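-- pv_equiv track=rewrite | github.com/Jingr33/training_diary | calendarOption/tableContentFiller.py | _compilePlanData
-- ===== SOURCE A (Python) =====
-- def _compilePlanData (file_lines : list) -> list:
--     """Vrátí jeden list zpracovaných dat vytvořených z načtených řádků z databáze
--     cyklického tréninkového plánu."""
--     cycle_plans = [[]] # list plánů
--     i = 0 # proměnná indexů listu
--     for one_line in file_lines: # cyklus přes řádky ze souboru
--         one_line = one_line.replace("\n", "") # vymazání odřádkovacích znaků
--         if one_line == ";": # pokud je to dělící řádek
--             i = i + 1 # zvýší se index listu
--             cycle_plans.append([]) # přidání listu na konec (velkého) listu, pro další tréninkový plán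
--         else:
--             cycle_plans[i].append(one_line)
--     del cycle_plans [-1] # odstranění podleníhoo indexu, který se vždy udělá navíc
--     return cycle_plans
-- ===== SOURCE B (Python) =====
-- def _compilePlanData(file_lines: list) -> list:
--     """Separator-index-table re-implementation: collect the positions of ';'
--     lines once, then emit the slices between consecutive separators (content
--     after the last separator is never emitted, matching the original)."""
--     stripped = [line.replace("\n", "") for line in file_lines]
--     sep_indices = [i for i, line in enumerate(stripped) if line == ";"]
--     result = []
--     prev = 0
--     for idx in sep_indices:
--         result.append(stripped[prev:idx])
--         prev = idx + 1
--     return result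
-- ===== Notes on version B (the rewrite author's own statement) =====
-- stated objective: alternative
-- what changed: Replaces A's single pass that mutates a growing list-of-lists through a running group index (and deletes the always-extra last group) by an index-table decomposition: strip lines, collect all separator positions, then emit the slice between consecutive separators, naturally never emitting anything after the last separator.
import Mathlib
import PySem

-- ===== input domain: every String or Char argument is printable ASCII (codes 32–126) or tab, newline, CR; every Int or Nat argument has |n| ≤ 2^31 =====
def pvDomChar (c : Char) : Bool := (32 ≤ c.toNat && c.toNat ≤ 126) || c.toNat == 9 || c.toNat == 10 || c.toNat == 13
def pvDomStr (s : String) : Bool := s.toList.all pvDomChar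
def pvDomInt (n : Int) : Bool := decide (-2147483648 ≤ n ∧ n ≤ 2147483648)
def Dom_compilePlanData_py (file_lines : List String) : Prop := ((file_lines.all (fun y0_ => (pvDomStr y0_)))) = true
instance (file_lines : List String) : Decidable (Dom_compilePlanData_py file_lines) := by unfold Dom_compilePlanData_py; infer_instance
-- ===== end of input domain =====

-- B replaces A's mutating group-index pass by a separator-index table plus slicing (alternative decomposition, same cost).


-- ===== PORT A =====
-- A: one pass; a running group index i into a growing list of groups; append '[]' on ';',
-- otherwise append the stripped line to group i; finally 'del cycle_plans[-1]' (list always nonempty).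
def compilePlanData_py (file_lines : List String) : List (List String) :=
  let st := file_lines.foldl
    (fun (st : Int × List (List String)) one_line =>
      let l := PySem.Str.replace one_line "\n" ""
      if l = ";" then (st.1 + 1, st.2 ++ [[]])
      else (st.1, st.2.modify st.1.toNat (· ++ [l])))
    (0, [[]])
  st.2.dropLast

-- ===== PORT B =====
-- B: strip each line, table all separator indices, then slice between consecutive separators.
def compilePlanData_py_alt (file_lines : List String) : List (List String) :=
  let stripped := file_lines.map (fun l => PySem.Str.replace l "\n" "")
  let sepIdx := ((PySem.List.enumerate stripped 0).filter (fun p => p.2 = ";")).map (·.1)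
  (sepIdx.foldl
    (fun (st : List (List String) × Int) idx =>
      (st.1 ++ [PySem.List.slice stripped (some st.2) (some idx)], idx + 1))
    ([], 0)).1

-- ===== PRECONDITION & SPEC =====
def Spec_compilePlanData_py (file_lines : List String) (out : List (List String)) : Prop := out = compilePlanData_py_alt file_lines
instance (file_lines : List String) (out : List (List String)) : Decidable (Spec_compilePlanData_py file_lines out) := by unfold Spec_compilePlanData_py; infer_instance

-- ===== CLAIM (what is proved, stated in full; the proofs are below) =====
def Claim_equal_compilePlanData_py : Prop := ∀ (file_lines : List String), Dom_compilePlanData_py file_lines → Spec_compilePlanData_py file_lines (compilePlanData_py file_lines)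

-- ===== LEMMAS AND PROOFS =====

-- reference splitter: groups between separators, trailing group DROPPED (the common value of both ports)
def pvProc (cur : List String) : List String → List (List String)
  | [] => []
  | x :: xs => if x = ";" then cur :: pvProc [] xs else pvProc (cur ++ [x]) xs

-- reference splitter keeping the trailing group (A's list before 'del [-1]')
def pvSplit (cur : List String) : List String → List (List String)
  | [] => [cur]
  | x :: xs => if x = ";" then cur :: pvSplit [] xs else pvSplit (cur ++ [x]) xs

theorem pvSplit_ne_nil (cur : List String) (l : List String) : pvSplit cur l ≠ [] := by
  induction l generalizing cur with
  | nil => simp [pvSplit]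
  | cons x xs ih => simp only [pvSplit]; split <;> simp [ih]

theorem pvSplit_dropLast (l : List String) (cur : List String) :
    (pvSplit cur l).dropLast = pvProc cur l := by
  induction l generalizing cur with
  | nil => rfl
  | cons x xs ih =>
    simp only [pvSplit, pvProc]
    split
    · rw [List.dropLast_cons_of_ne_nil (pvSplit_ne_nil _ _), ih]
    · exact ih _

theorem pvModify_last (front : List (List String)) (cur : List String) (f : List String → List String) :
    (front ++ [cur]).modify front.length f = front ++ [f cur] := by
  induction front with
  | nil => rfl
  | cons a front ih => simpa [List.modify_cons] using ih

theorem pvFoldA (l : List String) (front : List (List String)) (cur : List String) :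
    (l.foldl
      (fun (st : Int × List (List String)) one_line =>
        let r := PySem.Str.replace one_line "\n" ""
        if r = ";" then (st.1 + 1, st.2 ++ [[]])
        else (st.1, st.2.modify st.1.toNat (· ++ [r])))
      ((front.length : Int), front ++ [cur])).2
    = front ++ pvSplit cur (l.map (fun s => PySem.Str.replace s "\n" "")) := by
  induction l generalizing front cur with
  | nil => rfl
  | cons x xs ih =>
    simp only [List.foldl_cons, List.map_cons, pvSplit]
    by_cases hx : PySem.Str.replace x "\n" "" = ";"
    · simp only [hx, reduceIte]
      rw [show ((front.length : Int) + 1) = (((front ++ [cur]).length : Nat) : Int) by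
        push_cast [List.length_append, List.length_singleton]; ring]
      rw [ih (front ++ [cur]) []]
      simp
    · simp only [hx, reduceIte]
      rw [show ((front.length : Int)).toNat = front.length by simp]
      rw [pvModify_last]
      exact ih front (cur ++ [PySem.Str.replace x "\n" ""])

-- the separator-index table, structurally
theorem pvSI_cons (x : String) (xs : List String) (k : Int) :
    ((PySem.List.enumerate (x :: xs) k).filter (fun p => p.2 = ";")).map (·.1)
      = (if x = ";" then [k] else [])
        ++ ((PySem.List.enumerate xs (k + 1)).filter (fun p => p.2 = ";")).map (·.1) := by
  rw [PySem.List.enumerate_cons]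
  by_cases hx : x = ";" <;> simp [hx]

theorem pvFoldB (s : List String) (cur : List String) (p : Nat) (acc : List (List String))
    (T : List String) (hT : T.drop p = cur ++ s) :
    ((((PySem.List.enumerate s ((p : Int) + cur.length)).filter (fun q => q.2 = ";")).map (·.1)).foldl
      (fun (st : List (List String) × Int) idx =>
        (st.1 ++ [PySem.List.slice T (some st.2) (some idx)], idx + 1))
      (acc, (p : Int))).1
    = acc ++ pvProc cur s := by
  induction s generalizing cur p acc with
  | nil => simp [PySem.List.enumerate_nil, pvProc]
  | cons x xs ih =>
    rw [pvSI_cons]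
    by_cases hx : x = ";"
    · rw [if_pos hx]
      simp only [List.singleton_append, List.foldl_cons]
      have hslice : PySem.List.slice T (some (p : Int)) (some ((p : Int) + (cur.length : Int)))
          = cur := by
        rw [show ((p : Int) + (cur.length : Int)) = ((p : Int) + ((cur.length : Nat) : Int)) by ring]
        rw [PySem.List.slice_natCast_add, hT]
        simp
      rw [hslice]
      have hdrop : T.drop (p + cur.length + 1) = ([] : List String) ++ xs := by
        rw [show p + cur.length + 1 = p + (cur.length + 1) by ring]
        rw [← List.drop_drop, hT, hx]
        rw [show cur ++ ";" :: xs = (cur ++ [";"]) ++ xs by simp]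
        simp
      have hih := ih [] (p + cur.length + 1) (acc ++ [cur]) hdrop
      push_cast at hih
      simp only [List.length_nil, Int.natCast_zero, add_zero] at hih
      rw [hih]
      simp [pvProc, hx]
    · rw [if_neg hx]
      rw [List.nil_append]
      have hdrop : T.drop p = (cur ++ [x]) ++ xs := by rw [hT]; simp
      have hih := ih (cur ++ [x]) p acc hdrop
      push_cast [List.length_append, List.length_singleton] at hih
      rw [show ((p : Int) + (cur.length : Int) + 1) = ((p : Int) + ((cur.length : Int) + 1)) by ring]
      rw [hih]
      simp [pvProc, hx]

-- ===== VERDICT (by name: the statement is the Claim_ definition above) =====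
theorem compilePlanData_py_spec : Claim_equal_compilePlanData_py := by
  intro file_lines _
  unfold Spec_compilePlanData_py compilePlanData_py compilePlanData_py_alt
  have hA := pvFoldA file_lines [] []
  simp only [List.length_nil, Nat.cast_zero, List.nil_append] at hA
  have hB := pvFoldB (file_lines.map (fun s => PySem.Str.replace s "\n" "")) [] 0 []
      (file_lines.map (fun s => PySem.Str.replace s "\n" "")) (by simp)
  simp only [List.length_nil, Nat.cast_zero, List.nil_append, add_zero] at hB
  simp only [hA, hB, pvSplit_dropLast]
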